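-- pv_equiv track=rewrite | github.com/adrcarrui/TFM | scripts/annotate_phases_final.py | fill_unlabeled_gaps
-- ===== SOURCE A (Python) =====
-- from typing import Dict, List, Optional, Tuple
--
-- def fill_unlabeled_gaps(labels: List[int]) -> int:
--     """
--     Rellena huecos unlabeled (0) SOLO si están entre dos segmentos con la misma etiqueta.
--     Ejemplo:
--     1 1 0 0 1 1  -> rellena los 0 con 1
--
--     Devuelve cuántos frames fueron rellenados.
--     """
--     filled = 0
--     n = len(labels)
--     i = 0
--
--     while i < n:
--         if labels[i] != 0:
--             i += 1
--             continue
--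
--         start = i
--         while i < n and labels[i] == 0:
--             i += 1
--         end = i - 1
--
--         left_label = labels[start - 1] if start - 1 >= 0 else None
--         right_label = labels[i] if i < n else None
--
--         if left_label is not None and right_label is not None and left_label == right_label and left_label != 0:
--             for j in range(start, end + 1):
--                 labels[j] = left_label
--                 filled += 1
--
--     return filled
-- ===== SOURCE B (Python) =====
-- from typing import List
--
-- def fill_unlabeled_gaps(labels: List[int]) -> int:
--     """Index-list decomposition: collect positions of non-zero frames once,
--     then fill the gap between each adjacent equal-labelled pair."""
--     nz = [(i, v) for i, v in enumerate(labels) if v != 0]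
--     filled = 0
--     for (p, a), (q, b) in zip(nz, nz[1:]):
--         if a == b:
--             for j in range(p + 1, q):
--                 labels[j] = a
--             filled += q - p - 1
--     return filled
-- ===== Notes on version B (the rewrite author's own statement) =====
-- stated objective: alternative
-- what changed: Replaces A's index-chasing while-loop that scans each zero run and inspects its two boundaries with a two-phase decomposition: first collect the (position,label) list of non-zero frames, then fill the gap between each adjacent equal-labelled pair and count q-p-1 per pair.
import Mathlib
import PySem

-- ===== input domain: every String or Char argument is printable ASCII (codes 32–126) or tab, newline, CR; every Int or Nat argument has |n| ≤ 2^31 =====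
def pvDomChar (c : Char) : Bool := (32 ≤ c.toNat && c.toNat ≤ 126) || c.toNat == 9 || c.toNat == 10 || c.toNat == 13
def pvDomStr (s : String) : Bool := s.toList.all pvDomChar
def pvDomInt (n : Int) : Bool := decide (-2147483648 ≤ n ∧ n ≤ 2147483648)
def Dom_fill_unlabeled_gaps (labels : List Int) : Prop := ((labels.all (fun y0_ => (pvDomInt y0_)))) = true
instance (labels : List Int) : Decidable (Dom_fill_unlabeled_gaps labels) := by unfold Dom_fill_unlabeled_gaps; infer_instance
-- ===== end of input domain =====

-- B replaces A's boundary-scanning while-loop by a non-zero index list walked pairwise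
-- (objective: alternative decomposition). Both Pythons mutate `labels` identically; the
-- equivalence proved here is about the RETURN value (the filled-frame count).

-- ===== PORT A =====
-- inner `while i < n and labels[i] == 0` of A
def fillSkipA (labels : List Int) (i : Nat) : Nat :=
  if _h : i < labels.length then
    if labels.getD i 0 = 0 then fillSkipA labels (i + 1) else i
  else i
termination_by labels.length - i

theorem fillSkipA_ge (labels : List Int) (i : Nat) : i ≤ fillSkipA labels i := by
  fun_induction fillSkipA with
  | case1 i h hz ih => omega
  | case2 i h hz => omega
  | case3 i h => omega

-- outer `while i < n` of A (mutation dropped: only the returned count is modelled;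
-- A never re-reads a cell it wrote, so the count is unaffected)
def fillGoA (labels : List Int) (i : Nat) (filled : Int) : Int :=
  if _h : i < labels.length then
    if labels.getD i 0 ≠ 0 then fillGoA labels (i + 1) filled
    else
      let start := i
      let i2 := fillSkipA labels i
      let endIdx := i2 - 1
      let left : Option Int := if 1 ≤ start then some (labels.getD (start - 1) 0) else none
      let right : Option Int := if i2 < labels.length then some (labels.getD i2 0) else none
      let filled2 :=
        if left ≠ none ∧ right ≠ none ∧ left = right ∧ left ≠ some 0 then
          -- `for j in range(start, end + 1): labels[j] = left_label; filled += 1`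
          (List.range' start (endIdx + 1 - start)).foldl (fun f _ => f + 1) filled
        else filled
      fillGoA labels i2 filled2
  else filled
termination_by labels.length - i
decreasing_by
  · omega
  · have h1 : i + 1 ≤ fillSkipA labels (i + 1) := fillSkipA_ge labels (i + 1)
    have h2 : fillSkipA labels i = fillSkipA labels (i + 1) := by
      rw [fillSkipA]; simp_all
    omega

def fill_unlabeled_gaps (labels : List Int) : Int := fillGoA labels 0 0

-- ===== PORT B =====
-- `for (p,a),(q,b) in zip(nz, nz[1:]): if a == b: filled += q - p - 1` (count only;
-- the inner fill `labels[j] = a` does not feed back into the count)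
def fillPairsB : List (Int × Int) → Int
  | (p, a) :: (q, b) :: rest =>
      (if a = b then q - p - 1 else 0) + fillPairsB ((q, b) :: rest)
  | _ => 0

def fill_unlabeled_gaps_alt (labels : List Int) : Int :=
  fillPairsB ((PySem.List.enumerate labels 0).filter (fun p => p.2 ≠ 0))

-- ===== PRECONDITION & SPEC =====
def Spec_fill_unlabeled_gaps (labels : List Int) (out : Int) : Prop := out = fill_unlabeled_gaps_alt labels
instance (labels : List Int) (out : Int) : Decidable (Spec_fill_unlabeled_gaps labels out) := by unfold Spec_fill_unlabeled_gaps; infer_instance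

-- ===== CLAIM (what is proved, stated in full; the proofs are below) =====
def Claim_equal_fill_unlabeled_gaps : Prop := ∀ (labels : List Int), Dom_fill_unlabeled_gaps labels → Spec_fill_unlabeled_gaps labels (fill_unlabeled_gaps labels)

-- ===== LEMMAS AND PROOFS =====

-- the non-zero (index, value) pairs of `labels` at positions ≥ i
def nzFrom (labels : List Int) (i : Nat) : List (Int × Int) :=
  if _h : i < labels.length then
    if labels.getD i 0 = 0 then nzFrom labels (i + 1)
    else ((i : Int), labels.getD i 0) :: nzFrom labels (i + 1)
  else []
termination_by labels.length - i

theorem nzFrom_eq_filter (labels : List Int) (i : Nat) :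
    (PySem.List.enumerate (labels.drop i) (i : Int)).filter (fun p => p.2 ≠ 0) = nzFrom labels i := by
  fun_induction nzFrom with
  | case1 i h hz ih =>
      have hd : labels.drop i = labels[i] :: labels.drop (i + 1) :=
        List.drop_eq_getElem_cons h
      have hge : labels.getD i 0 = labels[i] := List.getD_eq_getElem labels 0 h
      have hzz : labels[i] = 0 := hge ▸ hz
      rw [hd, PySem.List.enumerate_cons, List.filter_cons,
        show ((i : Int) + 1) = ((i + 1 : Nat) : Int) by push_cast; ring, ih]
      simp [hzz]
  | case2 i h hz ih =>
      have hd : labels.drop i = labels[i] :: labels.drop (i + 1) :=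
        List.drop_eq_getElem_cons h
      have hge : labels.getD i 0 = labels[i] := List.getD_eq_getElem labels 0 h
      have hzz : ¬ labels[i] = 0 := hge ▸ hz
      have hq : labels[i]?.getD 0 = labels[i] := by simp [List.getElem?_eq_getElem h]
      rw [hd, PySem.List.enumerate_cons, List.filter_cons,
        show ((i : Int) + 1) = ((i + 1 : Nat) : Int) by push_cast; ring, ih]
      simp [hzz, hq]
  | case3 i h =>
      have : labels.drop i = [] := List.drop_eq_nil_of_le (by omega)
      simp [this, PySem.List.enumerate]

theorem nzFrom_skip (labels : List Int) (i : Nat) :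
    nzFrom labels i = nzFrom labels (fillSkipA labels i) := by
  fun_induction fillSkipA with
  | case1 i h hz ih => rw [nzFrom, dif_pos h, if_pos hz]; exact ih
  | case2 i h hz => rfl
  | case3 i h => rfl

theorem nzFrom_stop (labels : List Int) (i : Nat) (h : ¬ i < labels.length) :
    nzFrom labels i = [] := by rw [nzFrom, dif_neg h]

theorem nzFrom_cons (labels : List Int) (i : Nat) (h : i < labels.length)
    (hnz : labels.getD i 0 ≠ 0) :
    nzFrom labels i = ((i : Int), labels.getD i 0) :: nzFrom labels (i + 1) := by
  rw [nzFrom, dif_pos h, if_neg hnz]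

theorem fillSkipA_stop (labels : List Int) (i : Nat)
    (h : fillSkipA labels i < labels.length) : labels.getD (fillSkipA labels i) 0 ≠ 0 := by
  fun_induction fillSkipA with
  | case1 i h' hz ih => exact ih h
  | case2 i h' hz => exact hz
  | case3 i h' => omega

theorem fillSkipA_step (labels : List Int) (i : Nat) (h : i < labels.length)
    (hz : labels.getD i 0 = 0) : fillSkipA labels i = fillSkipA labels (i + 1) := by
  rw [fillSkipA, dif_pos h, if_pos hz]

theorem foldl_count (k : Nat) : ∀ (s : Nat) (f : Int),
    (List.range' s k).foldl (fun a _ => a + 1) f = f + (k : Int) := by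
  induction k with
  | zero => intro s f; simp
  | succ m ih =>
      intro s f
      rw [List.range'_succ]
      simp only [List.foldl]
      rw [ih]
      push_cast; ring

theorem fillGoA_stop (labels : List Int) (i : Nat) (f : Int) (h : ¬ i < labels.length) :
    fillGoA labels i f = f := by rw [fillGoA, dif_neg h]

theorem fillGoA_nz (labels : List Int) (i : Nat) (f : Int) (h : i < labels.length)
    (hnz : labels.getD i 0 ≠ 0) : fillGoA labels i f = fillGoA labels (i + 1) f := by
  rw [fillGoA, dif_pos h, if_pos hnz]

theorem fillGoA_zero (labels : List Int) (i : Nat) (f : Int) (h : i < labels.length)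
    (hz : labels.getD i 0 = 0) :
    fillGoA labels i f =
      fillGoA labels (fillSkipA labels i)
        (if (if 1 ≤ i then some (labels.getD (i - 1) 0) else none) ≠ none ∧
            (if fillSkipA labels i < labels.length then some (labels.getD (fillSkipA labels i) 0) else none) ≠ none ∧
            (if 1 ≤ i then some (labels.getD (i - 1) 0) else none) =
              (if fillSkipA labels i < labels.length then some (labels.getD (fillSkipA labels i) 0) else none) ∧
            (if 1 ≤ i then some (labels.getD (i - 1) 0) else none) ≠ some 0 then
          (List.range' i (fillSkipA labels i - 1 + 1 - i)).foldl (fun f _ => f + 1) f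
        else f) := by
  rw [fillGoA, dif_pos h, if_neg (by simpa using hz)]

-- main invariant: from any non-zero position, A's remaining count is B's pairwise sum
theorem fillGoA_eq_pairs (labels : List Int) : ∀ (k i : Nat) (f : Int),
    labels.length - i ≤ k → i < labels.length → labels.getD i 0 ≠ 0 →
    fillGoA labels i f = f + fillPairsB (nzFrom labels i) := by
  intro k
  induction k with
  | zero => intro i f hk h _; omega
  | succ m ih =>
      intro i f hk h hnz
      rw [fillGoA_nz labels i f h hnz, nzFrom_cons labels i h hnz]
      by_cases h1 : i + 1 < labels.length
      · by_cases hz1 : labels.getD (i + 1) 0 = 0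
        · -- a zero run starts at i+1
          rw [fillGoA_zero labels (i + 1) f h1 hz1]
          have hstep : fillSkipA labels (i + 1) ≥ i + 2 := by
            rw [fillSkipA_step labels (i + 1) h1 hz1]
            have := fillSkipA_ge labels (i + 2); omega
          set j := fillSkipA labels (i + 1) with hj
          have hskip : nzFrom labels (i + 1) = nzFrom labels j := nzFrom_skip labels (i + 1)
          by_cases hjl : j < labels.length
          · have hb : labels.getD j 0 ≠ 0 := fillSkipA_stop labels (i + 1) hjl
            have hia : i + 1 - 1 = i := by omega
            rw [hskip, ih j _ (by omega) hjl hb]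
            simp only [if_pos (by omega : 1 ≤ i + 1), if_pos hjl, hia]
            rw [foldl_count]
            have hc : ((j - 1 + 1 - (i + 1) : Nat) : Int) = (j : Int) - i - 1 := by omega
            have ha0 : some (labels.getD i 0) ≠ some 0 := by simpa using hnz
            by_cases hab : labels.getD i 0 = labels.getD j 0
            · rw [if_pos ⟨by simp, by simp, by rw [hab], ha0⟩, hc,
                nzFrom_cons labels j hjl hb]
              simp only [fillPairsB]
              rw [if_pos hab]
              ring
            · rw [if_neg (by rintro ⟨-, -, he, -⟩; exact hab (Option.some.inj he)), nzFrom_cons labels j hjl hb]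
              simp only [fillPairsB]
              rw [if_neg hab]
              ring
          · -- the trailing run reaches the end: nothing to fill
            rw [if_neg (by simp [hjl]), fillGoA_stop labels j _ hjl, hskip,
              nzFrom_stop labels j hjl]
            simp [fillPairsB]
        · -- next frame is non-zero too: adjacent pair, gap 0
          rw [ih (i + 1) f (by omega) h1 hz1, nzFrom_cons labels (i + 1) h1 hz1]
          simp only [fillPairsB]
          have : ((i + 1 : Nat) : Int) - (i : Nat) - 1 = 0 := by push_cast; ring
          rw [this]
          split <;> ring
      · -- i was the last frame
        rw [fillGoA_stop labels (i + 1) f h1, nzFrom_stop labels (i + 1) h1]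
        simp [fillPairsB]

theorem alt_eq_nzFrom (labels : List Int) :
    fill_unlabeled_gaps_alt labels = fillPairsB (nzFrom labels 0) := by
  unfold fill_unlabeled_gaps_alt
  rw [← nzFrom_eq_filter labels 0]
  simp

theorem fill_unlabeled_gaps_spec' (labels : List Int) :
    fill_unlabeled_gaps labels = fill_unlabeled_gaps_alt labels := by
  unfold fill_unlabeled_gaps
  rw [alt_eq_nzFrom]
  by_cases h0 : 0 < labels.length
  · by_cases hz : labels.getD 0 0 = 0
    · rw [fillGoA_zero labels 0 0 h0 hz]
      have hfz : ¬ (1 : Nat) ≤ 0 := by omega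
      rw [if_neg (by simp [hfz])]
      set j := fillSkipA labels 0 with hj
      have hskip : nzFrom labels 0 = nzFrom labels j := nzFrom_skip labels 0
      by_cases hjl : j < labels.length
      · have hb := fillSkipA_stop labels 0 hjl
        rw [hskip, fillGoA_eq_pairs labels labels.length j 0 (by omega) hjl hb]
        ring
      · rw [fillGoA_stop labels j 0 hjl, hskip, nzFrom_stop labels j hjl]
        simp [fillPairsB]
    · rw [fillGoA_eq_pairs labels labels.length 0 0 (by omega) h0 (by simpa using hz)]
      ring
  · rw [fillGoA_stop labels 0 0 h0, nzFrom_stop labels 0 h0]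
    simp [fillPairsB]

-- ===== VERDICT (by name: the statement is the Claim_ definition above) =====
theorem fill_unlabeled_gaps_spec : Claim_equal_fill_unlabeled_gaps := by
  intro labels _
  unfold Spec_fill_unlabeled_gaps
  exact fill_unlabeled_gaps_spec' labels
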